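-- pv_equiv track=rewrite | github.com/satyanarayan-rao/protein_binding_at_enhancers | scripts/add_edges_to_footprints.py | get_border_methylated_cytosines
-- ===== SOURCE A (Python) =====
-- def get_border_methylated_cytosines (m_vec, len_vec):
--     left_border = None
--     right_border = None
--     cnt = 0
--     for c in m_vec:
--         if (c==".") or (c == c.lower()):
--             cnt+=1
--         elif c == c.upper():
--             break
--     left_border = cnt # point at the capital letter in python index scheme
--     cnt = 0
--     for c in m_vec[::-1]:
--         if (c==".") or (c == c.lower()):
--             cnt+=1
--         elif c == c.upper():
--             break
--     right_border = len(m_vec) - cnt - 1 # point at the capital letter in python index scheme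
--
--     if left_border == len_vec:
--         left_border = None
--         right_border = None
--     return left_border, right_border
-- ===== SOURCE B (Python) =====
-- def get_border_methylated_cytosines(m_vec, len_vec):
--     # one forward index-collecting pass; A's two break-scans become endpoint lookups
--     idx = [i for i, c in enumerate(m_vec) if c != c.lower() and c != '.']
--     if idx:
--         left_border, right_border = idx[0], idx[-1]
--     else:
--         left_border, right_border = len(m_vec), -1
--     if left_border == len_vec:
--         return None, None
--     return left_border, right_border
-- ===== Notes on version B (the rewrite author's own statement) =====
-- stated objective: simpler
-- what changed: Replaced A's two opposite-direction break-scans with one forward pass that collects all uppercase indices and reads the borders off its endpoints (with A's len/-1 fallback when none exist).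
import Mathlib
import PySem

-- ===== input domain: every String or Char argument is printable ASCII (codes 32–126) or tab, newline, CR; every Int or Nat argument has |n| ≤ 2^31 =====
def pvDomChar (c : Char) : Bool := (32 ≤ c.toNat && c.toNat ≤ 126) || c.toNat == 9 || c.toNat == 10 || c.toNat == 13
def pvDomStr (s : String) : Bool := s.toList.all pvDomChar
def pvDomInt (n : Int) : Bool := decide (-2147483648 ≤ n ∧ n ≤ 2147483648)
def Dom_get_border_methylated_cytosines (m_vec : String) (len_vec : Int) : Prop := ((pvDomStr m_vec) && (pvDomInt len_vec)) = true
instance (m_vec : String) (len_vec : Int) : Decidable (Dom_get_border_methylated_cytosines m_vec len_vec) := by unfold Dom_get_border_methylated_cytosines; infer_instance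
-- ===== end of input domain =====

-- B replaces A's two opposite-direction break-scans by one index-collecting pass with endpoint lookup (objective: simpler).

-- ===== PORT A =====
-- the body of A's two identical for-loops: count of skipped chars before the break
-- (the loop over m_vec[::-1] is run on the reversed character list, exact for a full step -1 slice)
def pvScanBreak : List Char → Int
  | [] => 0
  | c :: rest =>
    if c == '.' || c == PySem.Chars.lowerChar c then 1 + pvScanBreak rest
    else if c == PySem.Chars.upperChar c then 0
    else pvScanBreak rest

def get_border_methylated_cytosines (m_vec : String) (len_vec : Int) : Option Int × Option Int :=
  let s := m_vec.toList
  let left_border : Int := pvScanBreak s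
  let right_border : Int := (s.length : Int) - pvScanBreak s.reverse - 1
  if left_border == len_vec then (none, none) else (some left_border, some right_border)

-- ===== PORT B =====
-- B's uppercase predicate: c != c.lower() and c != '.'
def pvUp (c : Char) : Bool := c != PySem.Chars.lowerChar c && c != '.'

-- B's list comprehension: [i for i, c in enumerate(m_vec) if c != c.lower() and c != '.']
def pvIdxK (l : List Char) (k : Int) : List Int :=
  (PySem.List.enumerate l k).filterMap (fun p => if pvUp p.2 then some p.1 else none)

def get_border_methylated_cytosines_alt (m_vec : String) (len_vec : Int) : Option Int × Option Int :=
  let s := m_vec.toList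
  let br : Int × Int :=
    match pvIdxK s 0 with
    | [] => ((s.length : Int), (-1 : Int))
    | i :: rest => (i, (i :: rest).getLastD i)   -- idx[0], idx[-1] (nonempty, so getLastD's default is never used)
  if br.1 == len_vec then (none, none) else (some br.1, some br.2)

-- ===== PRECONDITION & SPEC =====
def Spec_get_border_methylated_cytosines (m_vec : String) (len_vec : Int) (out : Option Int × Option Int) : Prop := out = get_border_methylated_cytosines_alt m_vec len_vec
instance (m_vec : String) (len_vec : Int) (out : Option Int × Option Int) : Decidable (Spec_get_border_methylated_cytosines m_vec len_vec out) := by unfold Spec_get_border_methylated_cytosines; infer_instance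

-- ===== CLAIM (what is proved, stated in full; the proofs are below) =====
def Claim_equal_get_border_methylated_cytosines : Prop := ∀ (m_vec : String) (len_vec : Int), Dom_get_border_methylated_cytosines m_vec len_vec → Spec_get_border_methylated_cytosines m_vec len_vec (get_border_methylated_cytosines m_vec len_vec)

-- ===== LEMMAS AND PROOFS =====

-- A's skip condition is the negation of B's uppercase predicate
theorem pv_skip_eq (c : Char) : (c == '.' || c == PySem.Chars.lowerChar c) = !pvUp c := by
  unfold pvUp
  cases h1 : (c == '.') <;> cases h2 : (c == PySem.Chars.lowerChar c) <;>
    simp only [bne, h1, h2, Bool.not_true, Bool.not_false, Bool.and_true, Bool.and_false, Bool.or_true, Bool.or_false]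

-- when the skip condition fails, A's elif always fires (the break always happens)
theorem pv_break_always (c : Char) (h : pvUp c = true) : (c == PySem.Chars.upperChar c) = true := by
  have hup : PySem.Chars.isupper c = true := by
    by_contra hn
    simp only [Bool.not_eq_true] at hn
    simp [pvUp, PySem.Chars.lowerChar, hn] at h
  have hlo : PySem.Chars.islower c = false := by
    simp only [PySem.Chars.isupper, Bool.and_eq_true, decide_eq_true_eq] at hup
    have : c < 'a' := lt_of_le_of_lt hup.2 (by decide)
    simp [PySem.Chars.islower, not_le.mpr this]
  simp [PySem.Chars.upperChar, hlo]

theorem pvScanBreak_up (c : Char) (rest : List Char) (h : pvUp c = true) :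
    pvScanBreak (c :: rest) = 0 := by
  simp [pvScanBreak, pv_skip_eq, h, pv_break_always c h]

theorem pvScanBreak_skip (c : Char) (rest : List Char) (h : pvUp c = false) :
    pvScanBreak (c :: rest) = 1 + pvScanBreak rest := by
  simp [pvScanBreak, pv_skip_eq, h]

theorem pvScanBreak_all (l : List Char) (h : l.all (fun c => !pvUp c) = true) :
    pvScanBreak l = (l.length : Int) := by
  induction l with
  | nil => simp [pvScanBreak]
  | cons c rest ih =>
    simp only [List.all_cons, Bool.and_eq_true, Bool.not_eq_true'] at h
    rw [pvScanBreak_skip c rest h.1, ih h.2]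
    simp only [List.length_cons]; push_cast; ring

theorem pvIdxK_head (l : List Char) : ∀ k : Int,
    (pvIdxK l k).head? = if l.all (fun c => !pvUp c) then none else some (k + pvScanBreak l) := by
  induction l with
  | nil => intro k; simp [pvIdxK, PySem.List.enumerate]
  | cons c rest ih =>
    intro k
    by_cases h : pvUp c = true
    · simp [pvIdxK, PySem.List.enumerate_cons, h,
        pvScanBreak_up c rest h]
    · simp only [Bool.not_eq_true] at h
      have : pvIdxK (c :: rest) k = pvIdxK rest (k + 1) := by
        simp [pvIdxK, PySem.List.enumerate_cons, h]
      rw [this, ih (k + 1), pvScanBreak_skip c rest h]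
      simp [h]
      split <;> [rfl; (congr 1; ring)]

theorem pvIdxK_append_singleton (l : List Char) (c : Char) (k : Int) :
    pvIdxK (l ++ [c]) k = pvIdxK l k ++ (if pvUp c then [k + (l.length : Int)] else []) := by
  simp only [pvIdxK, PySem.List.enumerate_append, List.filterMap_append]
  congr 1
  by_cases h : pvUp c = true <;>
    simp [PySem.List.enumerate, h]

theorem pvIdxK_getLast (l : List Char) : ∀ k : Int,
    (pvIdxK l k).getLast? =
      if l.all (fun c => !pvUp c) then none
      else some (k + (l.length : Int) - 1 - pvScanBreak l.reverse) := by
  induction l using List.reverseRecOn with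
  | nil => intro k; simp [pvIdxK, PySem.List.enumerate]
  | append_singleton l c ih =>
    intro k
    rw [pvIdxK_append_singleton]
    by_cases h : pvUp c = true
    · rw [List.reverse_append]
      simp only [h, if_pos]
      rw [List.getLast?_concat]
      have hbr : pvScanBreak (c :: l.reverse) = 0 := pvScanBreak_up c l.reverse h
      simp [h, hbr]
      ring
    · simp only [Bool.not_eq_true] at h
      rw [List.reverse_append]
      simp only [h, if_neg, Bool.false_eq_true, not_false_iff, List.append_nil,
        List.reverse_cons, List.reverse_nil, List.nil_append, List.singleton_append]
      rw [ih k]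
      have hbr : pvScanBreak (c :: l.reverse) = 1 + pvScanBreak l.reverse :=
        pvScanBreak_skip c l.reverse h
      simp [h, hbr]
      split <;> [rfl; (congr 1; push_cast; ring)]

-- ===== VERDICT (by name: the statement is the Claim_ definition above) =====
theorem get_border_methylated_cytosines_spec : Claim_equal_get_border_methylated_cytosines := by
  intro m_vec len_vec _
  unfold Spec_get_border_methylated_cytosines
  unfold get_border_methylated_cytosines get_border_methylated_cytosines_alt
  set s := m_vec.toList with hs
  cases hidx : pvIdxK s 0 with
  | nil =>
    have hh := pvIdxK_head s 0
    rw [hidx] at hh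
    have hall : s.all (fun c => !pvUp c) = true := by
      by_contra hn
      simp only [Bool.not_eq_true] at hn
      simp [hn] at hh
    have h1 : pvScanBreak s = (s.length : Int) := pvScanBreak_all s hall
    have h2 : pvScanBreak s.reverse = (s.length : Int) := by
      rw [pvScanBreak_all s.reverse (by simpa using hall)]; simp
    simp only [hidx, h1, h2]
    have : (s.length : Int) - (s.length : Int) - 1 = -1 := by ring
    rw [this]
  | cons i rest =>
    have hh := pvIdxK_head s 0
    rw [hidx] at hh
    have hall : s.all (fun c => !pvUp c) = false := by
      by_contra hn
      simp only [Bool.not_eq_false] at hn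
      simp [hn] at hh
    rw [hall] at hh
    simp only [List.head?_cons, if_neg (by simp : ¬(false = true))] at hh
    have hi : i = pvScanBreak s := by
      have := Option.some.inj hh; omega
    have hl := pvIdxK_getLast s 0
    rw [hidx, hall] at hl
    simp only [if_neg (by simp : ¬(false = true))] at hl
    have hlast : (i :: rest).getLastD i = (s.length : Int) - pvScanBreak s.reverse - 1 := by
      rw [List.getLastD_eq_getLast?, hl]
      simp; ring
    simp only [hidx]
    rw [hlast, hi]
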